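-- pv_equiv track=rewrite | github.com/oOuuuuOo/egress-verifier | scripts/openclaw_egress_verifier.py | build_ip_rollup
-- ===== SOURCE A (Python) =====
-- from typing import Any, Dict, List, Optional, Tuple
--
-- def is_ip_like(value: str) -> bool:
--     return bool(value) and ("." in value or ":" in value)
--
-- def build_ip_rollup(results: List[Tuple[str, str, str]]) -> List[Tuple[str, str]]:
--     grouped: Dict[str, str] = {}
--     for result_ip, _, attr in results:
--         if not is_ip_like(result_ip):
--             continue
--         grouped.setdefault(result_ip, attr)
--
--     ordered = sorted(grouped.items(), key=lambda item: item[0])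
--     return [(ip, attr) for ip, attr in ordered]
-- ===== SOURCE B (Python) =====
-- def is_ip_like(value: str) -> bool:
--     return bool(value) and ("." in value or ":" in value)
--
-- def build_ip_rollup(results):
--     # filter to ip-like rows, stable-sort the (ip, attr) pairs by ip,
--     # then emit the first pair of each equal-ip run in one linear pass
--     pairs = [(ip, attr) for ip, _, attr in results if is_ip_like(ip)]
--     pairs.sort(key=lambda p: p[0])
--     out = []
--     i = 0
--     n = len(pairs)
--     while i < n:
--         ip, attr = pairs[i]
--         out.append((ip, attr))
--         while i < n and pairs[i][0] == ip:
--             i += 1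
--     return out
-- ===== Notes on version B (the rewrite author's own statement) =====
-- stated objective: alternative
-- what changed: B replaces A's dict-with-setdefault grouping followed by sorting the items with a filter, one stable sort of the (ip, attr) pairs by ip, and a single linear pass that emits the first pair of each equal-ip run (stability makes that first pair the first-seen one, matching setdefault).
import Mathlib
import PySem

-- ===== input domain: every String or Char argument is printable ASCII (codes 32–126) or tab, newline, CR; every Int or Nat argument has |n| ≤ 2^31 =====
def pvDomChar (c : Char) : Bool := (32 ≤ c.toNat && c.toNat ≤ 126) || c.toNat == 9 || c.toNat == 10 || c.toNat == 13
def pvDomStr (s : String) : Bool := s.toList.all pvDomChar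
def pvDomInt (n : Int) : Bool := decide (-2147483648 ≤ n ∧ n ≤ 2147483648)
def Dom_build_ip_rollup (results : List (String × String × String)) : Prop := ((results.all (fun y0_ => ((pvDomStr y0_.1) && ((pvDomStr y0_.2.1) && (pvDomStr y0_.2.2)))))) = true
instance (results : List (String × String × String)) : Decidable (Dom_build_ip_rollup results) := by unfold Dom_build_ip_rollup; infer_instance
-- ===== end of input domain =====

-- B replaces A's dict-with-setdefault grouping by a filter + stable sort by ip + one linear
-- pass taking the first pair of each equal-ip run (objective: alternative decomposition).

-- ===== PORT A =====
def is_ip_like (value : String) : Bool :=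
  (decide (PySem.Str.len value ≠ 0)) && (PySem.Str.isIn "." value || PySem.Str.isIn ":" value)

def build_ip_rollup (results : List (String × String × String)) : List (String × String) :=
  let grouped : PySem.Dict String String :=
    results.foldl (fun d r => if !(is_ip_like r.1) then d else d.setdefault r.1 r.2.2) PySem.Dict.empty
  let ordered := PySem.List.sorted grouped.items (fun item => item.1)
  ordered.map (fun p => (p.1, p.2))

-- ===== PORT B =====
-- the outer while loop of Source B: emit pairs[i], then the inner while loop skips the
-- rest of the equal-ip run (= dropWhile), and continue from there
def scanRuns : List (String × String) → List (String × String)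
  | [] => []
  | p :: t => p :: scanRuns (t.dropWhile (fun q => q.1 == p.1))
  termination_by s => s.length
  decreasing_by
    exact Nat.lt_succ_of_le (List.length_dropWhile_le _ _)

def build_ip_rollup_alt (results : List (String × String × String)) : List (String × String) :=
  let pairs := (results.filter (fun r => is_ip_like r.1)).map (fun r => (r.1, r.2.2))
  scanRuns (PySem.List.sorted pairs (fun p => p.1))

-- ===== PRECONDITION & SPEC =====
def Spec_build_ip_rollup (results : List (String × String × String)) (out : List (String × String)) : Prop := out = build_ip_rollup_alt results
instance (results : List (String × String × String)) (out : List (String × String)) : Decidable (Spec_build_ip_rollup results out) := by unfold Spec_build_ip_rollup; infer_instance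

-- ===== CLAIM (what is proved, stated in full; the proofs are below) =====
def Claim_equal_build_ip_rollup : Prop := ∀ (results : List (String × String × String)), Dom_build_ip_rollup results → Spec_build_ip_rollup results (build_ip_rollup results)

-- ===== LEMMAS AND PROOFS =====

-- first pair of l whose key is k (default irrelevant: only used when some pair matches)
def firstAttrD (l : List (String × String)) (k : String) : String :=
  ((l.filter (fun p => p.1 == k)).headD ("", "")).2

-- canonical value both programs compute: distinct keys in increasing order, each with
-- the attr of its first occurrence in the filtered pair list
def canon (l : List (String × String)) : List (String × String) :=
  (PySem.List.sorted (PySem.Set.ofList (l.map Prod.fst)) (fun k => k)).map (fun k => (k, firstAttrD l k))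

theorem filter_ne_nil_of_mem {l : List (String × String)} {k : String}
    (h : k ∈ l.map Prod.fst) : l.filter (fun p => p.1 == k) ≠ [] := by
  obtain ⟨p, hp, rfl⟩ := List.mem_map.mp h
  intro hnil
  have := List.filter_eq_nil_iff.mp hnil p hp
  simp at this

theorem filter_eq_nil_of_not_mem {l : List (String × String)} {k : String}
    (h : k ∉ l.map Prod.fst) : l.filter (fun p => p.1 == k) = [] := by
  apply List.filter_eq_nil_iff.mpr
  intro p hp
  simp only [beq_iff_eq]
  intro hk
  exact h (List.mem_map.mpr ⟨p, hp, hk⟩)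

theorem firstAttrD_append_of_mem {l l' : List (String × String)} {k : String}
    (h : k ∈ l.map Prod.fst) : firstAttrD (l ++ l') k = firstAttrD l k := by
  unfold firstAttrD
  rw [List.filter_append]
  rcases hf : l.filter (fun p => p.1 == k) with _ | ⟨p, t⟩
  · exact absurd hf (filter_ne_nil_of_mem h)
  · rw [hf]; simp

-- the A-side dict loop: items = distinct keys in first-insertion order, first attr each
theorem items_foldl_setdefault (l : List (String × String)) :
    (l.foldl (fun d p => d.setdefault p.1 p.2) (PySem.Dict.empty : PySem.Dict String String)).items
      = (PySem.Set.ofList (l.map Prod.fst)).map (fun k => (k, firstAttrD l k)) := by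
  induction l using List.reverseRecOn with
  | nil => rfl
  | append_singleton l p ih =>
    rw [List.foldl_append]
    simp only [List.foldl_cons, List.foldl_nil]
    by_cases hm : p.1 ∈ l.map Prod.fst
    · have hc : (l.foldl (fun d q => d.setdefault q.1 q.2)
          (PySem.Dict.empty : PySem.Dict String String)).contains p.1 = true := by
        simp only [PySem.Dict.contains, ih]
        apply List.any_eq_true.mpr
        exact ⟨(p.1, firstAttrD l p.1),
          List.mem_map.mpr ⟨p.1, (PySem.Set.mem_ofList _ _).mpr hm, rfl⟩, by simp⟩
      rw [PySem.Dict.setdefault_of_contains _ p.2 hc, ih]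
      have hS : PySem.Set.ofList ((l ++ [p]).map Prod.fst) = PySem.Set.ofList (l.map Prod.fst) := by
        rw [List.map_append]
        simp only [List.map_cons, List.map_nil]
        rw [PySem.Set.ofList_append_singleton]
        have hcc : (PySem.Set.ofList (l.map Prod.fst)).contains p.1 = true := by
          have := (PySem.Set.mem_ofList (l.map Prod.fst) p.1).mpr hm
          simpa using this
        simp only [PySem.Set.add, hcc]
        simp
      rw [hS]
      apply List.map_congr_left
      intro k hk
      rw [firstAttrD_append_of_mem ((PySem.Set.mem_ofList _ _).mp hk)]
    · have hc : (l.foldl (fun d q => d.setdefault q.1 q.2)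
          (PySem.Dict.empty : PySem.Dict String String)).contains p.1 = false := by
        simp only [PySem.Dict.contains, ih]
        apply List.any_eq_false.mpr
        intro q hq
        obtain ⟨k, hkS, rfl⟩ := List.mem_map.mp hq
        have hkl : k ∈ l.map Prod.fst := (PySem.Set.mem_ofList _ _).mp hkS
        simp only [beq_iff_eq]
        exact fun he => hm (he ▸ hkl)
      rw [PySem.Dict.setdefault_of_not_contains _ p.2 hc,
        PySem.Dict.items_insert_of_not_contains _ p.2 hc, ih]
      have hS : PySem.Set.ofList ((l ++ [p]).map Prod.fst)
          = PySem.Set.ofList (l.map Prod.fst) ++ [p.1] := by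
        rw [List.map_append]
        simp only [List.map_cons, List.map_nil]
        rw [PySem.Set.ofList_append_singleton]
        have hnc : (PySem.Set.ofList (l.map Prod.fst)).contains p.1 = false := by
          have : p.1 ∉ PySem.Set.ofList (l.map Prod.fst) :=
            fun h => hm ((PySem.Set.mem_ofList _ _).mp h)
          simpa using this
        simp only [PySem.Set.add, hnc]
        simp
      rw [hS, List.map_append]
      congr 1
      · apply List.map_congr_left
        intro k hk
        rw [firstAttrD_append_of_mem ((PySem.Set.mem_ofList _ _).mp hk)]
      · have hfp : firstAttrD (l ++ [p]) p.1 = p.2 := by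
          unfold firstAttrD
          rw [List.filter_append, filter_eq_nil_of_not_mem hm, List.nil_append,
            List.filter_cons_of_pos (by simp)]
          rfl
        simp [hfp]

-- stability of insertBy for a non-matching key
theorem insertBy_filter_ne (x : String × String) (ys : List (String × String)) {k : String}
    (h : (x.1 == k) = false) :
    (PySem.List.insertBy (fun a b => decide (a.1 < b.1)) x ys).filter (fun p => p.1 == k)
      = ys.filter (fun p => p.1 == k) := by
  induction ys with
  | nil => simp [PySem.List.insertBy, h]
  | cons y t ih =>
    by_cases hb : x.1 < y.1
    · simp [PySem.List.insertBy, hb, List.filter_cons, h]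
    · simp only [PySem.List.insertBy, decide_eq_true_eq, hb, if_false]
      rw [List.filter_cons, List.filter_cons, ih]

-- stability of insertBy for the inserted key, on a key-sorted list
theorem insertBy_filter_self (x : String × String) (ys : List (String × String))
    (hys : ys.Pairwise (fun a b => a.1 ≤ b.1)) :
    (PySem.List.insertBy (fun a b => decide (a.1 < b.1)) x ys).filter (fun p => p.1 == x.1)
      = ys.filter (fun p => p.1 == x.1) ++ [x] := by
  induction ys with
  | nil => simp [PySem.List.insertBy]
  | cons y t ih =>
    rw [List.pairwise_cons] at hys
    by_cases hb : x.1 < y.1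
    · have hnil : (y :: t).filter (fun p => p.1 == x.1) = [] := by
        apply List.filter_eq_nil_iff.mpr
        intro q hq
        have hxq : x.1 < q.1 := by
          rcases List.mem_cons.mp hq with rfl | hq'
          · exact hb
          · exact lt_of_lt_of_le hb (hys.1 q hq')
        simp only [beq_iff_eq]
        intro he
        rw [he] at hxq
        exact lt_irrefl _ hxq
      simp only [PySem.List.insertBy, decide_eq_true_eq, hb, if_true]
      rw [List.filter_cons_of_pos (by simp), hnil]
      simp
    · simp only [PySem.List.insertBy, decide_eq_true_eq, hb, if_false]
      rw [List.filter_cons, List.filter_cons, ih hys.2]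
      by_cases hy : (y.1 == x.1) = true <;> simp [hy]

-- stability of the Python sort: same-key pairs keep their original order
theorem sorted_filter_stable (l : List (String × String)) (k : String) :
    (PySem.List.sorted l (fun p => p.1)).filter (fun p => p.1 == k)
      = l.filter (fun p => p.1 == k) := by
  induction l using List.reverseRecOn with
  | nil =>
    rw [PySem.List.sorted_eq_foldl_insertBy]
    simp
  | append_singleton l x ih =>
    have hstep : PySem.List.sorted (l ++ [x]) (fun p => p.1)
        = PySem.List.insertBy (fun a b => decide (a.1 < b.1)) x (PySem.List.sorted l (fun p => p.1)) := by
      rw [PySem.List.sorted_eq_foldl_insertBy, List.foldl_append, ← PySem.List.sorted_eq_foldl_insertBy]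
      rfl
    rw [hstep, List.filter_append]
    by_cases hx : (x.1 == k) = true
    · have hk : k = x.1 := (beq_iff_eq.mp hx).symm
      subst hk
      rw [insertBy_filter_self x _ (PySem.List.sorted_pairwise l (fun p => p.1)), ih]
      simp [List.filter_cons]
    · rw [insertBy_filter_ne x _ (by simpa using hx), ih]
      simp [List.filter_cons, hx]

-- PySem.Set.ofList of a block of equal heads
theorem ofList_head_block (a : String) (l1 l2 : List String)
    (h1 : ∀ x ∈ l1, x = a) (h2 : a ∉ l2) :
    PySem.Set.ofList (a :: (l1 ++ l2)) = a :: PySem.Set.ofList l2 := by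
  have hdis : PySem.Set.discard (PySem.Set.ofList l2) a = PySem.Set.ofList l2 := by
    apply List.filter_eq_self.mpr
    intro y hy
    have hyl : y ∈ l2 := (PySem.Set.mem_ofList l2 y).mp hy
    simp only [Bool.not_eq_eq_eq_not, Bool.not_true, beq_eq_false_iff_ne, ne_eq]
    intro he
    exact h2 (he ▸ hyl)
  induction l1 with
  | nil =>
    rw [List.nil_append, PySem.Set.ofList_cons, hdis]
  | cons b l1' ih =>
    have hb : b = a := h1 b (by simp)
    subst hb
    have ih' := ih (fun x hx => h1 x (List.mem_cons_of_mem _ hx))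
    rw [List.cons_append, PySem.Set.ofList_cons, ih']
    have hstep : PySem.Set.discard (b :: PySem.Set.ofList l2) b
        = PySem.Set.discard (PySem.Set.ofList l2) b := by
      simp [PySem.Set.discard]
    rw [hstep, hdis]

theorem dropWhile_head_false {p : String × String → Bool} (l : List (String × String))
    {r : String × String} {t : List (String × String)}
    (h : l.dropWhile p = r :: t) : p r = false := by
  induction l with
  | nil => simp at h
  | cons a l ih =>
    rw [List.dropWhile_cons] at h
    by_cases ha : p a = true
    · rw [if_pos ha] at h; exact ih h
    · rw [if_neg ha] at h
      injection h with h1 _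
      simp only [Bool.not_eq_true] at ha
      exact h1 ▸ ha

theorem scanRuns_eq_aux :
    ∀ (n : Nat) (s : List (String × String)), s.length ≤ n →
      s.Pairwise (fun a b => a.1 ≤ b.1) →
      scanRuns s = (PySem.Set.ofList (s.map Prod.fst)).map (fun k => (k, firstAttrD s k)) := by
  intro n
  induction n with
  | zero =>
    intro s hlen _
    have hnil : s = [] := List.eq_nil_of_length_eq_zero (Nat.le_zero.mp hlen)
    subst hnil
    simp [scanRuns, PySem.Set.ofList]
  | succ n ih =>
    intro s hlen hs
    match s with
    | [] => simp [scanRuns, PySem.Set.ofList]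
    | p :: t =>
      rw [List.pairwise_cons] at hs
      obtain ⟨hp, ht⟩ := hs
      set t' := t.dropWhile (fun q => q.1 == p.1) with ht'
      have htt : t.takeWhile (fun q => q.1 == p.1) ++ t' = t := List.takeWhile_append_dropWhile
      have hsubl : t'.Sublist t := List.dropWhile_sublist _
      have ht'pw : t'.Pairwise (fun a b => a.1 ≤ b.1) := ht.sublist hsubl
      have hF1 : ∀ q ∈ t', q.1 ≠ p.1 := by
        intro q hq
        rcases ht'' : t' with _ | ⟨r, t''⟩
        · rw [ht''] at hq; simp at hq
        · have hr : (r.1 == p.1) = false :=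
            dropWhile_head_false t (ht'.symm.trans ht'')
          have hrmem : r ∈ t := hsubl.subset (ht'' ▸ List.mem_cons_self ..)
          have hpr : p.1 < r.1 :=
            lt_of_le_of_ne (hp r hrmem) (fun he => by simp [← he] at hr)
          rw [ht''] at hq
          rcases List.mem_cons.mp hq with rfl | hq'
          · exact fun he => by simp [he] at hr
          · have hrq : r.1 ≤ q.1 := by
              rw [ht''] at ht'pw
              exact (List.pairwise_cons.mp ht'pw).1 q hq'
            intro he
            rw [he] at hrq
            exact absurd (lt_of_lt_of_le hpr hrq) (lt_irrefl _)
      have hkeys : PySem.Set.ofList ((p :: t).map Prod.fst)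
          = p.1 :: PySem.Set.ofList (t'.map Prod.fst) := by
        have hmap : (p :: t).map Prod.fst
            = p.1 :: ((t.takeWhile (fun q => q.1 == p.1)).map Prod.fst ++ t'.map Prod.fst) := by
          conv_lhs => rw [← htt]
          simp
        rw [hmap]
        apply ofList_head_block
        · intro x hx
          obtain ⟨q, hq, rfl⟩ := List.mem_map.mp hx
          exact beq_iff_eq.mp (List.mem_takeWhile_imp (p := fun (r : String × String) => r.1 == p.1) hq)
        · intro hx
          obtain ⟨q, hq, he⟩ := List.mem_map.mp hx
          exact hF1 q hq he
      have hfilter : ∀ k, k ≠ p.1 →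
          (p :: t).filter (fun q => q.1 == k) = t'.filter (fun q => q.1 == k) := by
        intro k hk
        rw [List.filter_cons_of_neg (by simp only [beq_iff_eq]; exact fun he => hk he.symm)]
        conv_lhs => rw [← htt]
        rw [List.filter_append]
        have hnil : (t.takeWhile (fun q => q.1 == p.1)).filter (fun q => q.1 == k) = [] := by
          apply List.filter_eq_nil_iff.mpr
          intro q hq
          have hqp := List.mem_takeWhile_imp (p := fun (r : String × String) => r.1 == p.1) hq
          simp only [beq_iff_eq] at hqp ⊢
          rw [hqp]
          exact fun he => hk he.symm
        rw [hnil, List.nil_append]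
      have hlen' : t'.length ≤ n := by
        have h1 : t'.length ≤ t.length := List.length_dropWhile_le _ _
        have h2 : t.length + 1 ≤ n + 1 := hlen
        omega
      have hrec := ih t' hlen' ht'pw
      have hscan : scanRuns (p :: t) = p :: scanRuns t' := by rw [scanRuns]
      rw [hscan, hrec, hkeys, List.map_cons]
      congr 1
      · have hfst : firstAttrD (p :: t) p.1 = p.2 := by
          unfold firstAttrD
          rw [List.filter_cons_of_pos (by simp)]
          rfl
        rw [hfst]
      · apply List.map_congr_left
        intro k hk
        have hk' : k ∈ t'.map Prod.fst := (PySem.Set.mem_ofList _ _).mp hk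
        obtain ⟨q, hq, rfl⟩ := List.mem_map.mp hk'
        have : firstAttrD (p :: t) q.1 = firstAttrD t' q.1 := by
          unfold firstAttrD
          rw [hfilter q.1 (hF1 q hq)]
        rw [this]

-- the B-side run scan on a key-sorted list computes canon of that list
theorem scanRuns_eq (s : List (String × String)) (hs : s.Pairwise (fun a b => a.1 ≤ b.1)) :
    scanRuns s = (PySem.Set.ofList (s.map Prod.fst)).map (fun k => (k, firstAttrD s k)) :=
  scanRuns_eq_aux s.length s (le_refl _) hs

theorem A_eq_canon (l : List (String × String)) :
    PySem.List.sorted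
        ((l.foldl (fun d p => d.setdefault p.1 p.2) (PySem.Dict.empty : PySem.Dict String String)).items)
        (fun item => item.1)
      = canon l := by
  rw [items_foldl_setdefault]
  unfold canon
  apply PySem.List.sorted_eq_of_perm_of_pairwise_lt
  · exact (PySem.List.sorted_perm (PySem.Set.ofList (l.map Prod.fst)) (fun k => k) false).map _
  · rw [List.pairwise_map]
    exact PySem.List.sorted_ofList_pairwise_lt (l.map Prod.fst)

theorem ofList_sublist : ∀ (xs : List String), (PySem.Set.ofList xs).Sublist xs := by
  intro xs
  induction xs with
  | nil => simp [PySem.Set.ofList]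
  | cons x xs ih =>
    rw [PySem.Set.ofList_cons]
    refine List.Sublist.cons₂ x ?_
    simpa [PySem.Set.discard] using List.Sublist.trans List.filter_sublist ih

theorem B_eq_canon (l : List (String × String)) :
    scanRuns (PySem.List.sorted l (fun p => p.1)) = canon l := by
  have hpw : (PySem.List.sorted l (fun p => p.1)).Pairwise (fun a b => a.1 ≤ b.1) :=
    PySem.List.sorted_pairwise l _
  rw [scanRuns_eq _ hpw]
  unfold canon
  have hfa : ∀ k, firstAttrD (PySem.List.sorted l (fun p => p.1)) k = firstAttrD l k := by
    intro k
    unfold firstAttrD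
    rw [sorted_filter_stable]
  have hK : PySem.List.sorted (PySem.Set.ofList (l.map Prod.fst)) (fun k => k)
      = PySem.Set.ofList ((PySem.List.sorted l (fun p => p.1)).map Prod.fst) := by
    apply PySem.List.sorted_eq_of_perm_of_pairwise_lt
    · apply (List.perm_ext_iff_of_nodup (PySem.Set.nodup_ofList _) (PySem.Set.nodup_ofList _)).mpr
      intro a
      rw [PySem.Set.mem_ofList, PySem.Set.mem_ofList]
      exact ((PySem.List.sorted_perm l (fun p => p.1) false).map Prod.fst).mem_iff
    · have hle : (PySem.Set.ofList ((PySem.List.sorted l (fun p => p.1)).map Prod.fst)).Pairwise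
          (fun a b => a ≤ b) := by
        apply List.Pairwise.sublist (ofList_sublist _)
        rw [List.pairwise_map]
        exact hpw
      have hne : (PySem.Set.ofList ((PySem.List.sorted l (fun p => p.1)).map Prod.fst)).Pairwise
          (fun a b => a ≠ b) := PySem.Set.nodup_ofList _
      exact (hle.and hne).imp (fun h => lt_of_le_of_ne h.1 h.2)
  rw [hK]
  apply List.map_congr_left
  intro k _
  rw [hfa]

-- ===== VERDICT (by name: the statement is the Claim_ definition above) =====
theorem build_ip_rollup_spec : Claim_equal_build_ip_rollup := by
  intro results _
  unfold Spec_build_ip_rollup build_ip_rollup build_ip_rollup_alt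
  set l := (results.filter (fun r => is_ip_like r.1)).map (fun r => (r.1, r.2.2)) with hl
  have hfold :
      results.foldl (fun d r => if !(is_ip_like r.1) then d else d.setdefault r.1 r.2.2)
          (PySem.Dict.empty : PySem.Dict String String)
        = l.foldl (fun d p => d.setdefault p.1 p.2) PySem.Dict.empty := by
    rw [hl, List.foldl_map]
    rw [← PySem.List.foldl_if_eq_foldl_filter (fun r => is_ip_like r.1)
        (fun d (r : String × String × String) => d.setdefault r.1 r.2.2) results PySem.Dict.empty]
    apply PySem.List.foldl_congr_mem
    intro d r _
    cases is_ip_like r.1 <;> simp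
  simp only [hfold]
  have hmap : ∀ m : List (String × String), m.map (fun p => (p.1, p.2)) = m := by
    intro m; simp
  rw [hmap, A_eq_canon, B_eq_canon]
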